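-- pv_equiv track=rewrite | github.com/ArnaldOzPy/cubits-theory | write-cub.py | generate_cubits_matrix
-- ===== SOURCE A (Python) =====
-- def generate_cubits_matrix(byte_val):
--     """Genera la matriz CUBITs 6x8 para un byte dado"""
--     binary_byte = bin(byte_val)[2:].zfill(8)
--     matrix = []
--
--     for i in range(6):
--         row = []
--         for j in range(8):
--             target_pos = (j + i) % 8
--             row.append(binary_byte[target_pos])
--         matrix.append(''.join(row))
--
--     return matrix
-- ===== SOURCE B (Python) =====
-- def generate_cubits_matrix(byte_val):
--     """Genera la matriz CUBITs 6x8 para un byte dado"""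
--     binary_byte = bin(byte_val)[2:].zfill(8)
--     cur = binary_byte[:8]
--     matrix = []
--     for _ in range(6):
--         matrix.append(cur)
--         cur = cur[1:] + cur[0]
--     return matrix
-- ===== Notes on version B (the rewrite author's own statement) =====
-- stated objective: simpler
-- what changed: Each row is derived from the previous one by a single incremental left rotation of a running string (cur = cur[1:] + cur[0]), replacing A's nested inner loop that re-indexes binary_byte at (j+i) mod width per cell.
import Mathlib
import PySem

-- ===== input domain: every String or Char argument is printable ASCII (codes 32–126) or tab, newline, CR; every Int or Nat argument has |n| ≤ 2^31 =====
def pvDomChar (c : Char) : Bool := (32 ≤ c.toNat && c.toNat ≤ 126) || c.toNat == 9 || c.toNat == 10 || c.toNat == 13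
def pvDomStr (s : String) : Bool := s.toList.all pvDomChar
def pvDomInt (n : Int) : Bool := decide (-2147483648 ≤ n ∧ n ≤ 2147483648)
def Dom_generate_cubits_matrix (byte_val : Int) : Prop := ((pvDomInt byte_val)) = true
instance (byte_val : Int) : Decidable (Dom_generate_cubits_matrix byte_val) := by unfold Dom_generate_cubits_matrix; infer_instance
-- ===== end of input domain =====

-- B derives each row from the previous one by a single incremental left rotation instead of
-- A's nested loop re-indexing binary_byte[(j+i)%8] per cell (objective: simpler).

-- ===== PORT A =====
-- the two loops of A over the zfilled bit string (rows are List Char; ''.join of the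
-- appended 1-char strings is exactly String.mk of the collected chars)
def aRows (binary_byte : List Char) : List String :=
  (PySem.List.pyRange 0 6 1).foldl (fun matrix i =>
    let row : List Char :=
      (PySem.List.pyRange 0 8 1).foldl (fun row j =>
        let target_pos := PySem.Int.mod (j + i) 8
        -- binary_byte[target_pos]: always in range (0 ≤ target_pos < 8 ≤ length), so the
        -- default of pyGetD is never used and indexing is exact
        row ++ [PySem.List.pyGetD binary_byte target_pos '0']) []
    matrix ++ [String.mk row]) []

def generate_cubits_matrix (byte_val : Int) : List String :=
  let binary_byte := PySem.Chars.zfill (PySem.List.slice (PySem.Int.pyBin byte_val).toList (some 2) none) 8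
  aRows binary_byte

-- ===== PORT B =====
-- B's loop: state (matrix, cur); append cur, then cur = cur[1:] + cur[0]
def bRows (binary_byte : List Char) : List String :=
  let cur0 := PySem.List.slice binary_byte none (some 8)
  let st := (PySem.List.pyRange 0 6 1).foldl (fun (st : List String × List Char) _ =>
      let (matrix, cur) := st
      (matrix ++ [String.mk cur],
       PySem.List.slice cur (some 1) none ++ [PySem.List.pyGetD cur 0 '0'])) ([], cur0)
  st.1

def generate_cubits_matrix_alt (byte_val : Int) : List String :=
  let binary_byte := PySem.Chars.zfill (PySem.List.slice (PySem.Int.pyBin byte_val).toList (some 2) none) 8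
  bRows binary_byte

-- ===== PRECONDITION & SPEC =====
def Spec_generate_cubits_matrix (byte_val : Int) (out : List String) : Prop := out = generate_cubits_matrix_alt byte_val
instance (byte_val : Int) (out : List String) : Decidable (Spec_generate_cubits_matrix byte_val out) := by unfold Spec_generate_cubits_matrix; infer_instance

-- ===== CLAIM (what is proved, stated in full; the proofs are below) =====
def Claim_equal_generate_cubits_matrix : Prop := ∀ (byte_val : Int), Dom_generate_cubits_matrix byte_val → Spec_generate_cubits_matrix byte_val (generate_cubits_matrix byte_val)

-- ===== LEMMAS AND PROOFS =====

-- on any bit string of length ≥ 8 (zfill(8) guarantees this) the two loop shapes agree: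
-- with the first eight characters explicit, both sides evaluate to the same six rotations
lemma rows_eq (s : List Char) (h : 8 ≤ s.length) : aRows s = bRows s := by
  rcases s with _ | ⟨a0, s⟩; · simp at h
  rcases s with _ | ⟨a1, s⟩; · simp at h
  rcases s with _ | ⟨a2, s⟩; · simp at h <;> omega
  rcases s with _ | ⟨a3, s⟩; · simp at h <;> omega
  rcases s with _ | ⟨a4, s⟩; · simp at h <;> omega
  rcases s with _ | ⟨a5, s⟩; · simp at h <;> omega
  rcases s with _ | ⟨a6, s⟩; · simp at h <;> omega
  rcases s with _ | ⟨a7, s⟩; · simp at h <;> omega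
  have h2 : ∀ (k m : Int), k < m → k < (s.length : Int) + m :=
    fun k m hk => lt_add_of_nonneg_of_lt (by positivity) hk
  simp [aRows, bRows, PySem.List.pyRange, PySem.Int.mod, PySem.List.pyGetD, PySem.List.slice,
        PySem.List.clampIdx, List.range_succ, PySem.List.pyGet?, Int.fmod, PySem.List.pyIdx?,
        add_assoc, h2]

-- ===== VERDICT (by name: the statement is the Claim_ definition above) =====
theorem generate_cubits_matrix_spec : Claim_equal_generate_cubits_matrix := by
  intro byte_val _
  unfold Spec_generate_cubits_matrix generate_cubits_matrix generate_cubits_matrix_alt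
  exact rows_eq _ (by simp [PySem.Chars.length_zfill])
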